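-- pv_equiv track=rewrite | github.com/christianebacani/Roadmap | Coding Challenges using Python and SQL/Code Wars Python Solved Problems/6 Kyu/message_validator.py | is_a_valid_message
-- ===== SOURCE A (Python) =====
-- def get_length_of_every_words(word: str) -> list[int]:
--     result = ''
--
--     for i in range(len(word)):
--         if word[i].isdigit():
--             result += word[i]
--
--         else:
--             result += ' '
--
--     result = result.split()
--
--     for i in range(len(result)):
--         result[i] = int(result[i])
--
--     return result
--
-- def get_every_words(message: str) -> list[str]:
--     result = ''
--
--     for i in range(len(message)):
--         if message[i].isalpha():
--             result += message[i]
--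
--         else:
--             result += ' '
--
--     result = result.split()
--
--     return result
--
-- def is_a_valid_message(message: str) -> bool:
--     if message == '':
--         return True
--
--     if message[-1].isdigit():
--         return False
--
--     length_of_every_words = get_length_of_every_words(message)
--     words = get_every_words(message)
--
--     if len(length_of_every_words) != len(words):
--         return False
--
--     total_length = len(words)
--
--     for i in range(total_length):
--         if len(words[i]) != length_of_every_words[i]:
--             return False
--
--     return True
-- ===== SOURCE B (Python) =====
-- def is_a_valid_message(message: str) -> bool:
--     if message == '':
--         return True
--
--     if message[-1].isdigit():
--         return False
--
--     # One pass: group maximal digit runs and maximal alpha runs with a tiny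
--     # state machine instead of building two masked copies and re-splitting them.
--     numbers = []
--     words = []
--     cur = ''
--     mode = ' '
--     for ch in message:
--         cls = 'd' if ch.isdigit() else ('a' if ch.isalpha() else ' ')
--         if cls != mode:
--             if mode == 'd':
--                 numbers.append(int(cur))
--             elif mode == 'a':
--                 words.append(cur)
--             cur = ''
--             mode = cls
--         cur += ch
--     if mode == 'd':
--         numbers.append(int(cur))
--     elif mode == 'a':
--         words.append(cur)
--
--     return len(numbers) == len(words) and all(len(w) == n for w, n in zip(words, numbers))
-- ===== Notes on version B (the rewrite author's own statement) =====
-- stated objective: simpler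
-- what changed: Replaces A's two masked-copy passes (build a digit-masked and an alpha-masked string character by character, split() each, re-parse one of them) by a single left-to-right state machine that groups maximal digit runs and alpha runs in one pass, then compares the two run lists with zip.
import Mathlib
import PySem

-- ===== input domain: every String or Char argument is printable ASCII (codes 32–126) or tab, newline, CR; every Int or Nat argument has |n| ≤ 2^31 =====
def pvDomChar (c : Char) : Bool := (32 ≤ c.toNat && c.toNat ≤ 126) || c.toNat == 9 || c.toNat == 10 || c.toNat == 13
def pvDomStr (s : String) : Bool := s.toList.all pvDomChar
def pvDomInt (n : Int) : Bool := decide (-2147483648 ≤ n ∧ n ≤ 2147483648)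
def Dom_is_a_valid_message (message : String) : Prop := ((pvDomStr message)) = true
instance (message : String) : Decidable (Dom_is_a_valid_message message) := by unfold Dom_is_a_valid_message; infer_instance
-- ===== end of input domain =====

-- B replaces A's two masked-copy-then-split passes by one grouping state machine; objective: simpler.

-- ===== PORT A =====
-- get_length_of_every_words: mask non-digits to ' ', split, int() each piece
-- (the in-place `result[i] = int(result[i])` index loop is rendered as the map it performs;
--  int() on a piece never raises since pieces are nonempty digit runs — .getD 0 is never used there)
def pvALengths (word : List Char) : List Int :=
  let result : List Char :=
    (PySem.List.pyRange 0 (word.length : Int) 1).foldl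
      (fun acc i =>
        acc ++ [if PySem.Chars.isdigit (PySem.List.pyGetD word i ' ') then PySem.List.pyGetD word i ' ' else ' ']) []
  (PySem.Chars.split₀ result).map (fun w => (PySem.Int.ofChars? w).getD 0)

-- get_every_words: mask non-alphas to ' ', split
def pvAWords (message : List Char) : List (List Char) :=
  let result : List Char :=
    (PySem.List.pyRange 0 (message.length : Int) 1).foldl
      (fun acc i =>
        acc ++ [if PySem.Chars.isalpha (PySem.List.pyGetD message i ' ') then PySem.List.pyGetD message i ' ' else ' ']) []
  PySem.Chars.split₀ result

def is_a_valid_message (message : String) : Bool :=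
  if message == "" then true
  else if (PySem.Str.pyGet? message (-1)).elim false PySem.Chars.isdigit then false
  else
    let lens := pvALengths message.toList
    let words := pvAWords message.toList
    if lens.length ≠ words.length then false
    else
      (PySem.List.pyRange 0 (words.length : Int) 1).all
        (fun i => (((PySem.List.pyGetD words i []).length : Int)) == PySem.List.pyGetD lens i 0)

-- ===== PORT B =====
def pvClass (ch : Char) : Char :=
  if PySem.Chars.isdigit ch then 'd' else if PySem.Chars.isalpha ch then 'a' else ' '

-- flush the pending run (the `if mode == 'd' … elif mode == 'a' …` block of Source B)
def pvFlushInto (nums : List Int) (words : List (List Char)) (cur : List Char) (mode : Char) :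
    List Int × List (List Char) :=
  if mode = 'd' then (nums ++ [(PySem.Int.ofChars? cur).getD 0], words)
  else if mode = 'a' then (nums, words ++ [cur])
  else (nums, words)

def pvStep (st : List Int × List (List Char) × List Char × Char) (ch : Char) :
    List Int × List (List Char) × List Char × Char :=
  let (nums, words, cur, mode) := st
  let cls := pvClass ch
  if cls ≠ mode then
    let (nums', words') := pvFlushInto nums words cur mode
    (nums', words', [ch], cls)
  else (nums, words, cur ++ [ch], mode)

def is_a_valid_message_alt (message : String) : Bool :=
  if message == "" then true
  else if (PySem.Str.pyGet? message (-1)).elim false PySem.Chars.isdigit then false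
  else
    let (nums, words, cur, mode) := message.toList.foldl pvStep ([], [], [], ' ')
    let (numbers, words) := pvFlushInto nums words cur mode
    numbers.length == words.length && (words.zip numbers).all (fun p => ((p.1.length : Int)) == p.2)

-- ===== PRECONDITION & SPEC =====
def Spec_is_a_valid_message (message : String) (out : Bool) : Prop := out = is_a_valid_message_alt message
instance (message : String) (out : Bool) : Decidable (Spec_is_a_valid_message message out) := by unfold Spec_is_a_valid_message; infer_instance

-- ===== CLAIM (what is proved, stated in full; the proofs are below) =====
def Claim_equal_is_a_valid_message : Prop := ∀ (message : String), Dom_is_a_valid_message message → Spec_is_a_valid_message message (is_a_valid_message message)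

-- ===== LEMMAS AND PROOFS =====

-- maximal runs of p-characters, accumulator kept reversed (mirrors split₀.go's state)
def pvRuns (p : Char → Bool) : List Char → List Char → List (List Char)
  | [], cur => if cur.isEmpty then [] else [cur.reverse]
  | c :: rest, cur =>
    if p c then pvRuns p rest (c :: cur)
    else if cur.isEmpty then pvRuns p rest [] else cur.reverse :: pvRuns p rest []

lemma pv_digit_not_space (c : Char) (h : PySem.Chars.isdigit c = true) :
    PySem.Chars.isspace c = false := by
  simp [PySem.Chars.isdigit, Char.le_def, UInt32.le_iff_toNat_le, Char.toNat_val] at h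
  simp only [PySem.Chars.isspace,
    Bool.or_eq_false_iff, Bool.and_eq_false_iff, decide_eq_false_iff_not]
  omega

lemma pv_alpha_not_space (c : Char) (h : PySem.Chars.isalpha c = true) :
    PySem.Chars.isspace c = false := by
  simp [PySem.Chars.isalpha, PySem.Chars.isupper, PySem.Chars.islower, Char.le_def,
    UInt32.le_iff_toNat_le, Char.toNat_val] at h
  simp only [PySem.Chars.isspace,
    Bool.or_eq_false_iff, Bool.and_eq_false_iff, decide_eq_false_iff_not]
  omega

lemma pv_digit_not_alpha (c : Char) (h : PySem.Chars.isdigit c = true) :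
    PySem.Chars.isalpha c = false := by
  simp [PySem.Chars.isdigit, Char.le_def, UInt32.le_iff_toNat_le, Char.toNat_val] at h
  simp only [PySem.Chars.isalpha, PySem.Chars.isupper, PySem.Chars.islower, Char.le_def,
    UInt32.le_iff_toNat_le, Char.toNat_val,
    Bool.or_eq_false_iff, Bool.and_eq_false_iff, decide_eq_false_iff_not]
  have h1 : ('A' : Char).toNat = 65 := by decide
  have h2 : ('Z' : Char).toNat = 90 := by decide
  have h3 : ('a' : Char).toNat = 97 := by decide
  have h4 : ('z' : Char).toNat = 122 := by decide
  omega

-- A's masking loop produces the map of the mask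
lemma pv_mask_fold (p : Char → Bool) (cs : List Char) :
    (PySem.List.pyRange 0 (cs.length : Int) 1).foldl
      (fun acc i => acc ++ [if p (PySem.List.pyGetD cs i ' ') then PySem.List.pyGetD cs i ' ' else ' ']) []
    = cs.map (fun c => if p c then c else ' ') := by
  rw [PySem.List.foldl_append_singleton_eq_map
    (fun i => if p (PySem.List.pyGetD cs i ' ') then PySem.List.pyGetD cs i ' ' else ' ')]
  rw [show (fun (i : Int) => if p (PySem.List.pyGetD cs i ' ') then PySem.List.pyGetD cs i ' ' else ' ')
      = (fun c => if p c then c else ' ') ∘ (fun j => PySem.List.pyGetD cs j ' ') from rfl]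
  rw [← List.map_map, PySem.List.map_pyGetD_pyRange_zero']
  simp

-- split() of a masked string yields exactly the maximal p-runs
lemma pv_go_masked (p : Char → Bool) (hp : ∀ c, p c = true → PySem.Chars.isspace c = false) :
    ∀ (cs cur : List Char) (acc : List (List Char)),
      PySem.Chars.split₀.go (cs.map (fun c => if p c then c else ' ')) cur acc
        = acc.reverse ++ pvRuns p cs cur := by
  intro cs
  induction cs with
  | nil =>
    intro cur acc
    by_cases hc : cur.isEmpty <;> simp [PySem.Chars.split₀.go, pvRuns, hc]
  | cons c rest ih =>
    intro cur acc
    by_cases hpc : p c = true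
    · simp [PySem.Chars.split₀.go, pvRuns, hpc, hp c hpc, ih]
    · simp only [Bool.not_eq_true] at hpc
      by_cases hc : cur.isEmpty <;>
        simp [PySem.Chars.split₀.go, pvRuns, hpc, hc, ih,
          show PySem.Chars.isspace ' ' = true from by decide]

-- B's fold produces the digit runs (as ints) and the alpha runs
lemma pv_bfold (rest : List Char) :
    ∀ (nums : List Int) (words : List (List Char)) (cur : List Char) (mode : Char),
    mode = 'd' ∨ mode = 'a' ∨ mode = ' ' →
    (mode = 'd' ∨ mode = 'a' → cur ≠ []) →
    (fun st => pvFlushInto st.1 st.2.1 st.2.2.1 st.2.2.2) (rest.foldl pvStep (nums, words, cur, mode))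
      = (nums ++ (pvRuns PySem.Chars.isdigit rest (if mode = 'd' then cur.reverse else [])).map
            (fun w => (PySem.Int.ofChars? w).getD 0),
         words ++ pvRuns PySem.Chars.isalpha rest (if mode = 'a' then cur.reverse else [])) := by
  induction rest with
  | nil =>
    intro nums words cur mode hmode hcur
    rcases hmode with h | h | h <;> subst h
    · simp [pvFlushInto, pvRuns, hcur (Or.inl rfl)]
    · simp [pvFlushInto, pvRuns, hcur (Or.inr rfl)]
    · simp [pvFlushInto, pvRuns]
  | cons c rest ih =>
    intro nums words cur mode hmode hcur
    rw [List.foldl_cons]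
    by_cases hd : PySem.Chars.isdigit c = true
    · have ha := pv_digit_not_alpha c hd
      rcases hmode with h | h | h <;> subst h
      · rw [show pvStep (nums, words, cur, 'd') c = (nums, words, cur ++ [c], 'd') from by
            simp [pvStep, pvClass, hd],
          ih nums words (cur ++ [c]) 'd' (Or.inl rfl) (by simp)]
        simp [pvRuns, hd, ha]
      · rw [show pvStep (nums, words, cur, 'a') c = (nums, words ++ [cur], [c], 'd') from by
            simp [pvStep, pvClass, pvFlushInto, hd],
          ih nums (words ++ [cur]) [c] 'd' (Or.inl rfl) (by simp)]
        simp [pvRuns, hd, ha, hcur (Or.inr rfl)]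
      · rw [show pvStep (nums, words, cur, ' ') c = (nums, words, [c], 'd') from by
            simp [pvStep, pvClass, pvFlushInto, hd],
          ih nums words [c] 'd' (Or.inl rfl) (by simp)]
        simp [pvRuns, hd, ha]
    · by_cases hal : PySem.Chars.isalpha c = true
      · rcases hmode with h | h | h <;> subst h
        · rw [show pvStep (nums, words, cur, 'd') c
                = (nums ++ [(PySem.Int.ofChars? cur).getD 0], words, [c], 'a') from by
              simp [pvStep, pvClass, pvFlushInto, hd, hal],
            ih (nums ++ [(PySem.Int.ofChars? cur).getD 0]) words [c] 'a' (Or.inr (Or.inl rfl)) (by simp)]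
          simp [pvRuns, hd, hal, hcur (Or.inl rfl)]
        · rw [show pvStep (nums, words, cur, 'a') c = (nums, words, cur ++ [c], 'a') from by
              simp [pvStep, pvClass, hd, hal],
            ih nums words (cur ++ [c]) 'a' (Or.inr (Or.inl rfl)) (by simp)]
          simp [pvRuns, hd, hal]
        · rw [show pvStep (nums, words, cur, ' ') c = (nums, words, [c], 'a') from by
              simp [pvStep, pvClass, pvFlushInto, hd, hal],
            ih nums words [c] 'a' (Or.inr (Or.inl rfl)) (by simp)]
          simp [pvRuns, hd, hal]
      · rcases hmode with h | h | h <;> subst h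
        · rw [show pvStep (nums, words, cur, 'd') c
                = (nums ++ [(PySem.Int.ofChars? cur).getD 0], words, [c], ' ') from by
              simp [pvStep, pvClass, pvFlushInto, hd, hal],
            ih (nums ++ [(PySem.Int.ofChars? cur).getD 0]) words [c] ' ' (Or.inr (Or.inr rfl)) (by simp)]
          simp [pvRuns, hd, hal, hcur (Or.inl rfl)]
        · rw [show pvStep (nums, words, cur, 'a') c = (nums, words ++ [cur], [c], ' ') from by
              simp [pvStep, pvClass, pvFlushInto, hd, hal],
            ih nums (words ++ [cur]) [c] ' ' (Or.inr (Or.inr rfl)) (by simp)]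
          simp [pvRuns, hd, hal, hcur (Or.inr rfl)]
        · rw [show pvStep (nums, words, cur, ' ') c = (nums, words, cur ++ [c], ' ') from by
              simp [pvStep, pvClass, hd, hal],
            ih nums words (cur ++ [c]) ' ' (Or.inr (Or.inr rfl)) (by simp)]
          simp [pvRuns, hd, hal]

-- indexwise check = zip check, when the lengths agree
lemma pv_all_idx (ws : List (List Char)) (ns : List Int) (h : ws.length = ns.length) :
    (PySem.List.pyRange 0 (ws.length : Int) 1).all
      (fun i => (((PySem.List.pyGetD ws i []).length : Int)) == PySem.List.pyGetD ns i 0)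
    = (ws.zip ns).all (fun p => ((p.1.length : Int)) == p.2) := by
  rw [PySem.List.pyRange_zero_natCast, List.all_map]
  simp only [Function.comp_def, PySem.List.pyGetD_natCast]
  induction ws generalizing ns with
  | nil => simp
  | cons w ws ih =>
    cases ns with
    | nil => simp at h
    | cons n ns =>
      rw [List.length_cons, List.range_succ_eq_map, List.all_cons, List.all_map]
      simp only [Function.comp_def, List.getD_cons_succ, List.getD_cons_zero]
      rw [List.zip_cons_cons, List.all_cons]
      congr 1
      exact ih ns (by simpa using h)

-- ===== VERDICT (by name: the statement is the Claim_ definition above) =====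
theorem is_a_valid_message_spec : Claim_equal_is_a_valid_message := by
  intro message _
  unfold Spec_is_a_valid_message is_a_valid_message is_a_valid_message_alt
  by_cases h0 : (message == "") = true
  · rw [if_pos h0, if_pos h0]
  · rw [if_neg h0, if_neg h0]
    by_cases h1 : ((PySem.Str.pyGet? message (-1)).elim false PySem.Chars.isdigit) = true
    · rw [if_pos h1, if_pos h1]
    · rw [if_neg h1, if_neg h1]
      have hA : pvALengths message.toList
          = (pvRuns PySem.Chars.isdigit message.toList []).map (fun w => (PySem.Int.ofChars? w).getD 0) := by
        unfold pvALengths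
        dsimp only
        rw [pv_mask_fold]
        unfold PySem.Chars.split₀
        rw [pv_go_masked PySem.Chars.isdigit pv_digit_not_space]
        simp
      have hW : pvAWords message.toList = pvRuns PySem.Chars.isalpha message.toList [] := by
        unfold pvAWords
        dsimp only
        rw [pv_mask_fold]
        unfold PySem.Chars.split₀
        rw [pv_go_masked PySem.Chars.isalpha pv_alpha_not_space]
        simp
      have hB := pv_bfold message.toList [] [] [] ' ' (Or.inr (Or.inr rfl))
        (by intro h; rcases h with h | h <;> simp at h)
      rcases hfold : message.toList.foldl pvStep ([], [], [], ' ') with ⟨nums, words, cur, mode⟩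
      rw [hfold] at hB
      dsimp only
      simp at hB
      rcases hfl : pvFlushInto nums words cur mode with ⟨numbers, bwords⟩
      rw [hfl] at hB
      dsimp only
      simp only [Prod.mk.injEq] at hB
      obtain ⟨hnum, hwrd⟩ := hB
      rw [hA, hW]
      rw [hnum, hwrd]
      by_cases hlen : ((pvRuns PySem.Chars.isdigit message.toList []).map
          (fun w => (PySem.Int.ofChars? w).getD 0)).length = (pvRuns PySem.Chars.isalpha message.toList []).length
      · rw [if_neg (by simpa using hlen)]
        rw [pv_all_idx _ _ (by simpa using hlen.symm)]
        simp [hlen]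
      · rw [if_pos (by simpa using hlen)]
        have hfalse : ((List.map (fun w => (PySem.Int.ofChars? w).getD 0)
              (pvRuns PySem.Chars.isdigit message.toList [])).length ==
            (pvRuns PySem.Chars.isalpha message.toList []).length) = false := by
          simpa using hlen
        rw [hfalse, Bool.false_and]
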